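-- pv_equiv track=rewrite | github.com/Vagacoder/Codesignal | python/Arcade/Core/C105StarRotation.py | starRotation
-- ===== SOURCE A (Python) =====
-- def starRotation(matrix: list, width: int, center: list, t:int)-> list:
--     w = width//2
--     t %= 8
--     centerX = center[1]
--     centerY = center[0]
--     startX = center[1] - w
--     endX = center[1] + w
--     startY = center[0] - w
--     endY = center[0] + w
--
--     for _ in range(t):
--         temp = matrix[center[0]].copy()
--         for i in range(width):
--             matrix[centerY][startX + i] = matrix[endY-i][startX + i]
--             matrix[endY-i][startX+i] = matrix[endY-i][centerX]
--             matrix[endY-i][centerX] = matrix[endY-i][endX-i]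
--             matrix[endY-i][endX-i] = temp[endX-i]
--
--     return matrix
-- ===== SOURCE B (Python) =====
-- def starRotation(matrix: list, width: int, center: list, t: int) -> list:
--     # rotate each concentric 8-cell ring of the star by t in one gather/rotate/scatter pass
--     w = width // 2
--     t %= 8
--     cy, cx = center[0], center[1]
--     if t == 0:
--         return matrix
--     for d in range(1, w + 1):
--         ring = [(cy - d, cx - d), (cy, cx - d), (cy + d, cx - d), (cy + d, cx),
--                 (cy + d, cx + d), (cy, cx + d), (cy - d, cx + d), (cy - d, cx)]
--         vals = [matrix[r][c] for (r, c) in ring]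
--         for i in range(8):
--             r, c = ring[i]
--             matrix[r][c] = vals[(i + t) % 8]
--     return matrix
-- ===== Notes on version B (the rewrite author's own statement) =====
-- stated objective: alternative
-- what changed: A applies an intricate 4-assignment one-step permutation pass over the whole star t (up to 7) times; B decodes the rotation into its concentric 8-cell rings and does a single gather/rotate/scatter pass per ring. Pre_ excludes, besides the inputs where A raises or reads through Python's negative-index wraparound, the even widths: there A's inner loop covers an asymmetric slice of the star and its overlapping writes degenerate into a non-bijective clamped shift, an artefact of the implementation on a shape (an even-width 'star') the task never defines.
import Mathlib
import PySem

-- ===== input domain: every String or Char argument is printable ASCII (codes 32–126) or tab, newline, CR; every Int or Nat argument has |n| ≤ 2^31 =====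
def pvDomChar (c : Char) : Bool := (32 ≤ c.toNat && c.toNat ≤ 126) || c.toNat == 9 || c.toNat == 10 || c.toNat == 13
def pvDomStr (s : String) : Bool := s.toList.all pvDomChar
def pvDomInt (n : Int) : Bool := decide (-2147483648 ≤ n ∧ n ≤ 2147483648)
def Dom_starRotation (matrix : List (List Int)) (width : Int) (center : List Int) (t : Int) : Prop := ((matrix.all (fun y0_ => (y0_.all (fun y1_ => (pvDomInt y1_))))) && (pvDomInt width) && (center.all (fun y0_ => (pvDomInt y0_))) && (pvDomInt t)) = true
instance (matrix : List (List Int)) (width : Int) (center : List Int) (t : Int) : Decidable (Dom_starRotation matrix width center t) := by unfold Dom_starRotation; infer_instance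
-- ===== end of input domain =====

-- B rotates each concentric 8-cell ring of the star in one gather/rotate/scatter pass instead of
-- A's t repeated one-step permutation passes; equivalence is about the returned value (both
-- Pythons also mutate `matrix` in place in the same way on the admitted inputs).

-- ===== PORT A =====
-- shared matrix read/write helpers; Python-exact for the indices Pre_ admits
-- (all written cells have nonnegative in-range indices there; negative reads wrap like Python)
def mrow (M : List (List Int)) (r : Int) : List Int := PySem.List.pyGetD M r []
def mget (M : List (List Int)) (r c : Int) : Int := PySem.List.pyGetD (mrow M r) c 0
def mset (M : List (List Int)) (r c : Int) (v : Int) : List (List Int) :=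
  PySem.List.pySetD M r (PySem.List.pySetD (mrow M r) c v)

-- body of A's inner `for i in range(width)` loop, step for step
def aInner (centerY centerX startX endX endY : Int) (temp : List Int)
    (N : List (List Int)) (i : Int) : List (List Int) :=
  let n1 := mset N centerY (startX + i) (mget N (endY - i) (startX + i))
  let n2 := mset n1 (endY - i) (startX + i) (mget n1 (endY - i) centerX)
  let n3 := mset n2 (endY - i) centerX (mget n2 (endY - i) (endX - i))
  mset n3 (endY - i) (endX - i) (PySem.List.pyGetD temp (endX - i) 0)

-- one iteration of A's outer `for _ in range(t)` loop (temp = matrix[center[0]].copy())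
def aStep (width centerY centerX startX endX endY : Int) (M : List (List Int)) : List (List Int) :=
  let temp := mrow M centerY
  (PySem.List.pyRange 0 width 1).foldl (aInner centerY centerX startX endX endY temp) M

def starRotation (matrix : List (List Int)) (width : Int) (center : List Int) (t : Int) :
    List (List Int) :=
  let w := PySem.Int.floordiv width 2
  let t1 := PySem.Int.mod t 8
  let centerX := PySem.List.pyGetD center 1 0
  let centerY := PySem.List.pyGetD center 0 0
  let startX := centerX - w
  let endX := centerX + w
  -- Python also binds startY := centerY - w, which is never used afterwards
  let endY := centerY + w
  (PySem.List.pyRange 0 t1 1).foldl (fun M _ => aStep width centerY centerX startX endX endY M) matrix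

-- ===== PORT B =====
-- the 8 cells of the radius-d ring, in B's fixed order
def bCells (cy cx d : Int) : List (Int × Int) :=
  [(cy - d, cx - d), (cy, cx - d), (cy + d, cx - d), (cy + d, cx),
   (cy + d, cx + d), (cy, cx + d), (cy - d, cx + d), (cy - d, cx)]

-- body of B's `for d in range(1, w+1)` loop: gather the ring, rotate by t, scatter
def bBody (cy cx t1 : Int) (M : List (List Int)) (d : Int) : List (List Int) :=
  let ring := bCells cy cx d
  let vals := ring.map (fun p => mget M p.1 p.2)
  (PySem.List.pyRange 0 8 1).foldl (fun N i =>
    let p := PySem.List.pyGetD ring i (0, 0)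
    mset N p.1 p.2 (PySem.List.pyGetD vals (PySem.Int.mod (i + t1) 8) 0)) M

def starRotation_alt (matrix : List (List Int)) (width : Int) (center : List Int) (t : Int) :
    List (List Int) :=
  let w := PySem.Int.floordiv width 2
  let t1 := PySem.Int.mod t 8
  let cy := PySem.List.pyGetD center 0 0
  let cx := PySem.List.pyGetD center 1 0
  if t1 = 0 then matrix
  else (PySem.List.pyRange 1 (w + 1) 1).foldl (bBody cy cx t1) matrix

-- ===== PRECONDITION & SPEC =====
-- Pre_ excludes (a) the inputs on which A raises (center shorter than 2; a star cell outside the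
-- valid Python index range), (b) the inputs where the star sticks out to a negative row or column
-- index, on which Python's negative-index wraparound makes A's value an alias-across-the-border
-- accident, and (c) the even widths, on which A's inner loop covers an asymmetric slice of the
-- star and its overlapping writes degenerate into a non-bijective clamped shift — an artefact of
-- the implementation on a shape (an even-width "star") the task never defines.
def Pre_starRotation (matrix : List (List Int)) (width : Int) (center : List Int) (t : Int) : Prop :=
  2 ≤ center.length ∧
  (PySem.Int.mod t 8 = 0
   ∨ (width ≤ 0 ∧ PySem.Raise.InRange matrix.length (PySem.List.pyGetD center 0 0))
   ∨ (1 ≤ width ∧ PySem.Int.mod width 2 = 1 ∧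
      0 ≤ PySem.List.pyGetD center 1 0 - PySem.Int.floordiv width 2 ∧
      PySem.List.pyGetD center 1 0 + PySem.Int.floordiv width 2 <
        ((PySem.List.pyGetD matrix (PySem.List.pyGetD center 0 0) []).length : Int) ∧
      0 ≤ PySem.List.pyGetD center 0 0 + PySem.Int.floordiv width 2 - width + 1 ∧
      PySem.List.pyGetD center 0 0 + PySem.Int.floordiv width 2 < (matrix.length : Int) ∧
      ∀ i ∈ PySem.List.pyRange 0 width 1,
        PySem.List.pyGetD center 1 0 + |PySem.Int.floordiv width 2 - i| <
          ((PySem.List.pyGetD matrix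
              (PySem.List.pyGetD center 0 0 + PySem.Int.floordiv width 2 - i) []).length : Int)))
instance (matrix : List (List Int)) (width : Int) (center : List Int) (t : Int) :
    Decidable (Pre_starRotation matrix width center t) := by unfold Pre_starRotation; infer_instance

def pvWitness_starRotation : List (List Int) × Int × List Int × Int :=
  ([[1, 2, 3], [4, 5, 6], [7, 8, 9]], 3, [1, 1], 1)

def Spec_starRotation (matrix : List (List Int)) (width : Int) (center : List Int) (t : Int)
    (out : List (List Int)) : Prop := out = starRotation_alt matrix width center t
instance (matrix : List (List Int)) (width : Int) (center : List Int) (t : Int)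
    (out : List (List Int)) : Decidable (Spec_starRotation matrix width center t out) := by
  unfold Spec_starRotation; infer_instance

-- ===== CLAIM (what is proved, stated in full; the proofs are below) =====
def Claim_equal_starRotation : Prop := ∀ (matrix : List (List Int)) (width : Int) (center : List Int) (t : Int), Dom_starRotation matrix width center t → Pre_starRotation matrix width center t → Spec_starRotation matrix width center t (starRotation matrix width center t)

-- ===== LEMMAS AND PROOFS =====

-- row/cell views of the matrix, and shape bookkeeping
def rowlen (M : List (List Int)) (r : Int) : Int := ((mrow M r).length : Int)

def sameShape (M N : List (List Int)) : Prop :=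
  M.length = N.length ∧ ∀ r : Int, 0 ≤ r → rowlen M r = rowlen N r

def InM (M : List (List Int)) (r c : Int) : Prop :=
  0 ≤ r ∧ r < (M.length : Int) ∧ 0 ≤ c ∧ c < rowlen M r

-- the one-step gather map of A's inner loop after the iterations with u = w-i > lo-1 have run;
-- lo = w - width + 1 is the fully executed loop
def sig (cy cx w lo : Int) (p : Int × Int) : Int × Int :=
  if p.1 - cy ≠ 0 ∧ lo ≤ p.1 - cy ∧ p.1 - cy ≤ w ∧ p.2 - cx = -(p.1 - cy) then (p.1, cx)
  else if p.1 - cy ≠ 0 ∧ lo ≤ p.1 - cy ∧ p.1 - cy ≤ w ∧ p.2 - cx = 0 then (p.1, p.2 + (p.1 - cy))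
  else if p.1 - cy ≠ 0 ∧ lo ≤ p.1 - cy ∧ p.1 - cy ≤ w ∧ p.2 - cx = p.1 - cy then (cy, p.2)
  else if p.1 - cy = 0 ∧ p.2 - cx ≠ 0 ∧ lo ≤ -(p.2 - cx) ∧ -(p.2 - cx) ≤ w then (cy - (p.2 - cx), p.2)
  else p

-- geometric in-bounds facts used throughout (exactly what Pre_'s third branch provides)
def Bnd (cy cx w width : Int) (M : List (List Int)) : Prop :=
  1 ≤ width ∧ width = 2*w + 1 ∧
  0 ≤ cx - w ∧ 0 ≤ cy + w - width + 1 ∧ cy + w < (M.length : Int) ∧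
  cx + w < rowlen M cy ∧
  ∀ u : Int, w - width + 1 ≤ u → u ≤ w → cx + |u| < rowlen M (cy + u)

theorem pyGetD_oob {α : Type} (xs : List α) (i : Int) (d : α) (h : (xs.length : Int) ≤ i) :
    PySem.List.pyGetD xs i d = d := by
  apply PySem.List.pyGetD_of_none
  rw [PySem.List.pyGet?_eq_none_iff]
  unfold PySem.Raise.InRange
  omega

theorem length_mset (M : List (List Int)) (r c v : Int) : (mset M r c v).length = M.length := by
  simp [mset, PySem.List.length_pySetD]

theorem rowlen_mset (M : List (List Int)) (r c v r' : Int) (hr : 0 ≤ r) (hr' : 0 ≤ r') :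
    rowlen (mset M r c v) r' = rowlen M r' := by
  unfold rowlen mrow mset
  rw [PySem.List.pySetD_of_nonneg _ _ hr]
  by_cases h : r' < ((M.set r.toNat (PySem.List.pySetD (mrow M r) c v)).length : Int)
  · rw [PySem.List.pyGetD_eq_getElem _ _ hr' h]
    have h2 : r' < (M.length : Int) := by simpa using h
    rw [PySem.List.pyGetD_eq_getElem _ _ hr' h2]
    by_cases he : r = r'
    · subst he
      rw [List.getElem_set_self]
      rw [PySem.List.length_pySetD]
      unfold mrow
      rw [PySem.List.pyGetD_eq_getElem _ _ hr h2]
    · rw [List.getElem_set_ne (by omega)]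
  · have h2 : ¬ r' < (M.length : Int) := by simpa using h
    rw [pyGetD_oob _ _ _ (by simpa using h), pyGetD_oob _ _ _ (by omega)]

theorem mset_sameShape (M : List (List Int)) (r c v : Int) (hr : 0 ≤ r) :
    sameShape (mset M r c v) M :=
  ⟨length_mset M r c v, fun r' hr' => rowlen_mset M r c v r' hr hr'⟩

theorem sameShape_refl (M : List (List Int)) : sameShape M M := ⟨rfl, fun _ _ => rfl⟩

theorem sameShape_trans {M N K : List (List Int)} (h1 : sameShape M N) (h2 : sameShape N K) :
    sameShape M K :=
  ⟨h1.1.trans h2.1, fun r hr => (h1.2 r hr).trans (h2.2 r hr)⟩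

theorem InM_of_sameShape {M N : List (List Int)} {r c : Int} (h : sameShape M N)
    (hin : InM N r c) : InM M r c := by
  obtain ⟨h1, h2⟩ := h
  obtain ⟨a, b, cc, dd⟩ := hin
  exact ⟨a, by omega, cc, by rw [h2 r a]; exact dd⟩

theorem Bnd_of_sameShape {cy cx w width : Int} {M N : List (List Int)} (h : sameShape M N)
    (hb : Bnd cy cx w width N) : Bnd cy cx w width M := by
  obtain ⟨b1, b2, b3, b4, b5, b6, b7⟩ := hb
  refine ⟨b1, b2, b3, b4, by rw [h.1]; exact b5, ?_, ?_⟩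
  · rw [h.2 cy (by omega)]; exact b6
  · intro u h1 h2
    rw [h.2 (cy + u) (by omega)]
    exact b7 u h1 h2

theorem mget_mset_self (M : List (List Int)) (r c v : Int) (h0r : 0 ≤ r)
    (h1r : r < (M.length : Int)) (h0c : 0 ≤ c) (h1c : c < rowlen M r) :
    mget (mset M r c v) r c = v := by
  unfold mget mrow mset
  rw [PySem.List.pySetD_of_nonneg _ _ h0r]
  rw [PySem.List.pyGetD_eq_getElem _ _ h0r (by simpa using h1r)]
  rw [List.getElem_set_self]
  rw [PySem.List.pySetD_of_nonneg _ _ h0c]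
  have h1c' : c < ((mrow M r).length : Int) := h1c
  rw [PySem.List.pyGetD_eq_getElem _ _ h0c (by simp; omega)]
  rw [List.getElem_set_self]

theorem mget_mset_ne (M : List (List Int)) (r c v r' c' : Int) (h0r : 0 ≤ r) (h0c : 0 ≤ c)
    (h0r' : 0 ≤ r') (h0c' : 0 ≤ c') (hne : ¬(r' = r ∧ c' = c)) :
    mget (mset M r' c' v) r c = mget M r c := by
  unfold mget mrow mset
  rw [PySem.List.pySetD_of_nonneg _ _ h0r']
  by_cases h1r : r < (M.length : Int)
  · rw [PySem.List.pyGetD_eq_getElem _ _ h0r (by simpa using h1r)]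
    rw [PySem.List.pyGetD_eq_getElem _ _ h0r h1r]
    by_cases he : r = r'
    · subst he
      rw [List.getElem_set_self]
      have hcc : ¬ c = c' := fun h => hne ⟨by omega, by omega⟩
      rw [PySem.List.pySetD_of_nonneg _ _ h0c']
      unfold mrow
      rw [PySem.List.pyGetD_eq_getElem _ _ h0r h1r]
      by_cases h1c : c < ((M[r.toNat]'(by omega)).length : Int)
      · rw [PySem.List.pyGetD_eq_getElem _ _ h0c (by simpa using h1c)]
        rw [PySem.List.pyGetD_eq_getElem _ _ h0c h1c]
        rw [List.getElem_set_ne (by omega)]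
      · rw [pyGetD_oob _ _ _ (by simpa using h1c), pyGetD_oob _ _ _ (by omega)]
    · rw [List.getElem_set_ne (by omega)]
  · have e1 : PySem.List.pyGetD (M.set r'.toNat (PySem.List.pySetD (mrow M r') c' v)) r [] = [] :=
      pyGetD_oob _ _ _ (by simp; omega)
    have e2 : PySem.List.pyGetD M r [] = [] := pyGetD_oob _ _ _ (by omega)
    rw [e1, e2]

theorem mext (M N : List (List Int)) (hlen : M.length = N.length)
    (hrow : ∀ r : Int, 0 ≤ r → rowlen M r = rowlen N r)
    (hval : ∀ r c : Int, InM M r c → mget M r c = mget N r c) : M = N := by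
  apply List.ext_getElem hlen
  intro n h1 h2
  have hMn : mrow M (n : Int) = M[n] := by
    unfold mrow
    rw [PySem.List.pyGetD_eq_getElem _ _ (by positivity) (by exact_mod_cast h1)]
    simp
  have hNn : mrow N (n : Int) = N[n] := by
    unfold mrow
    rw [PySem.List.pyGetD_eq_getElem _ _ (by positivity) (by exact_mod_cast h2)]
    simp
  have hrl : (M[n].length : Int) = (N[n].length : Int) := by
    have h := hrow (n : Int) (by positivity)
    unfold rowlen at h
    rw [hMn, hNn] at h
    exact_mod_cast h
  apply List.ext_getElem (by exact_mod_cast hrl)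
  intro m hm1 hm2
  have hv := hval (n : Int) (m : Int)
    ⟨by positivity, by exact_mod_cast h1, by positivity, by
      unfold rowlen; rw [hMn]; exact_mod_cast hm1⟩
  unfold mget at hv
  rw [hMn, hNn] at hv
  rw [PySem.List.pyGetD_eq_getElem _ _ (by positivity) (by exact_mod_cast hm1)] at hv
  rw [PySem.List.pyGetD_eq_getElem _ _ (by positivity) (by exact_mod_cast hm2)] at hv
  simpa using hv

theorem sameShape_symm {M N : List (List Int)} (h : sameShape M N) : sameShape N M :=
  ⟨h.1.symm, fun r hr => (h.2 r hr).symm⟩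

-- sig either fixes a point or sends it to an in-bounds star cell
theorem sig_moved_inrange (cy cx w width lo : Int) (M : List (List Int))
    (hB : Bnd cy cx w width M) (hlo : w - width + 1 ≤ lo) (p : Int × Int) :
    sig cy cx w lo p = p ∨ InM M (sig cy cx w lo p).1 (sig cy cx w lo p).2 := by
  obtain ⟨b1, b2, b3, b4, b5, b6, b7⟩ := hB
  simp only [sig]
  split_ifs with h1 h2 h3 h4
  · right
    dsimp only
    have h7 := b7 (p.1 - cy) (by omega) (by omega)
    rcases abs_cases (p.1 - cy) with ⟨he, _⟩ | ⟨he, _⟩ <;> rw [he] at h7 <;>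
      exact ⟨by omega, by omega, by omega, by
        have : cy + (p.1 - cy) = p.1 := by ring
        rw [this] at h7; omega⟩
  · right
    dsimp only
    have h7 := b7 (p.1 - cy) (by omega) (by omega)
    rcases abs_cases (p.1 - cy) with ⟨he, _⟩ | ⟨he, _⟩ <;> rw [he] at h7 <;>
      exact ⟨by omega, by omega, by omega, by
        have : cy + (p.1 - cy) = p.1 := by ring
        rw [this] at h7; omega⟩
  · right
    dsimp only
    exact ⟨by omega, by omega, by omega, by omega⟩
  · right
    dsimp only
    have h7 := b7 (-(p.2 - cx)) (by omega) (by omega)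
    have hrw : cy + -(p.2 - cx) = cy - (p.2 - cx) := by ring
    rw [hrw] at h7
    rcases abs_cases (-(p.2 - cx)) with ⟨he, _⟩ | ⟨he, _⟩ <;> rw [he] at h7 <;>
      exact ⟨by omega, by omega, by omega, by omega⟩
  · left; rfl

-- a fully unexecuted inner loop gathers nothing
theorem sig_id (cy cx w lo : Int) (p : Int × Int) (hlo : w < lo) : sig cy cx w lo p = p := by
  simp only [sig]
  split_ifs with h1 h2 h3 h4 <;> first | rfl | (exfalso; omega)

-- the partial gather maps agree away from the cells of iteration k (u0 = w - k)
theorem sig_lo_step (cy cx w u0 : Int) (p : Int × Int)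
    (hn1 : p ≠ (cy, cx - u0)) (hn2 : p ≠ (cy + u0, cx - u0))
    (hn3 : p ≠ (cy + u0, cx)) (hn4 : p ≠ (cy + u0, cx + u0)) :
    sig cy cx w u0 p = sig cy cx w (u0 + 1) p := by
  have W1 : p.1 ≠ cy ∨ p.2 ≠ cx - u0 := by
    by_contra h; push_neg at h; exact hn1 (Prod.ext h.1 h.2)
  have W2 : p.1 ≠ cy + u0 ∨ p.2 ≠ cx - u0 := by
    by_contra h; push_neg at h; exact hn2 (Prod.ext h.1 h.2)
  have W3 : p.1 ≠ cy + u0 ∨ p.2 ≠ cx := by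
    by_contra h; push_neg at h; exact hn3 (Prod.ext h.1 h.2)
  have W4 : p.1 ≠ cy + u0 ∨ p.2 ≠ cx + u0 := by
    by_contra h; push_neg at h; exact hn4 (Prod.ext h.1 h.2)
  simp only [sig]
  by_cases c1 : p.1 - cy ≠ 0 ∧ u0 ≤ p.1 - cy ∧ p.1 - cy ≤ w ∧ p.2 - cx = -(p.1 - cy)
  · rw [if_pos c1, if_pos (show p.1 - cy ≠ 0 ∧ u0 + 1 ≤ p.1 - cy ∧ p.1 - cy ≤ w ∧
      p.2 - cx = -(p.1 - cy) by omega)]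
  · rw [if_neg c1, if_neg (show ¬(p.1 - cy ≠ 0 ∧ u0 + 1 ≤ p.1 - cy ∧ p.1 - cy ≤ w ∧
      p.2 - cx = -(p.1 - cy)) by omega)]
    by_cases c2 : p.1 - cy ≠ 0 ∧ u0 ≤ p.1 - cy ∧ p.1 - cy ≤ w ∧ p.2 - cx = 0
    · rw [if_pos c2, if_pos (show p.1 - cy ≠ 0 ∧ u0 + 1 ≤ p.1 - cy ∧ p.1 - cy ≤ w ∧
        p.2 - cx = 0 by omega)]
    · rw [if_neg c2, if_neg (show ¬(p.1 - cy ≠ 0 ∧ u0 + 1 ≤ p.1 - cy ∧ p.1 - cy ≤ w ∧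
        p.2 - cx = 0) by omega)]
      by_cases c3 : p.1 - cy ≠ 0 ∧ u0 ≤ p.1 - cy ∧ p.1 - cy ≤ w ∧ p.2 - cx = p.1 - cy
      · rw [if_pos c3, if_pos (show p.1 - cy ≠ 0 ∧ u0 + 1 ≤ p.1 - cy ∧ p.1 - cy ≤ w ∧
          p.2 - cx = p.1 - cy by omega)]
      · rw [if_neg c3, if_neg (show ¬(p.1 - cy ≠ 0 ∧ u0 + 1 ≤ p.1 - cy ∧ p.1 - cy ≤ w ∧
          p.2 - cx = p.1 - cy) by omega)]
        by_cases c4 : p.1 - cy = 0 ∧ p.2 - cx ≠ 0 ∧ u0 ≤ -(p.2 - cx) ∧ -(p.2 - cx) ≤ w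
        · rw [if_pos c4, if_pos (show p.1 - cy = 0 ∧ p.2 - cx ≠ 0 ∧ u0 + 1 ≤ -(p.2 - cx) ∧
            -(p.2 - cx) ≤ w by omega)]
        · rw [if_neg c4, if_neg (show ¬(p.1 - cy = 0 ∧ p.2 - cx ≠ 0 ∧ u0 + 1 ≤ -(p.2 - cx) ∧
            -(p.2 - cx) ≤ w) by omega)]

-- sig's value on the four cells of iteration u0 (valid for u0 = 0 as well)
theorem sig_cell1 (cy cx w u0 : Int) (h2 : u0 ≤ w) :
    sig cy cx w u0 (cy, cx - u0) = (cy + u0, cx - u0) := by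
  simp only [sig]
  split_ifs <;> first | rfl | (simp only [Prod.mk.injEq]; constructor <;> first | trivial | omega) | (exfalso; omega)

theorem sig_cell2 (cy cx w u0 : Int) (h2 : u0 ≤ w) :
    sig cy cx w u0 (cy + u0, cx - u0) = (cy + u0, cx) := by
  simp only [sig]
  split_ifs <;> first | rfl | (simp only [Prod.mk.injEq]; constructor <;> first | trivial | omega) | (exfalso; omega)

theorem sig_cell3 (cy cx w u0 : Int) (h2 : u0 ≤ w) :
    sig cy cx w u0 (cy + u0, cx) = (cy + u0, cx + u0) := by
  simp only [sig]
  split_ifs <;> first | rfl | (simp only [Prod.mk.injEq]; constructor <;> first | trivial | omega) | (exfalso; omega)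

theorem sig_cell4 (cy cx w u0 : Int) (h2 : u0 ≤ w) :
    sig cy cx w u0 (cy + u0, cx + u0) = (cy, cx + u0) := by
  simp only [sig]
  split_ifs <;> first | rfl | (simp only [Prod.mk.injEq]; constructor <;> first | trivial | omega) | (exfalso; omega)

-- before iteration u0 has run, its four cells are still ungathered
theorem sig_cell_fix (cy cx w u0 : Int) (p : Int × Int)
    (hp : p = (cy + u0, cx - u0) ∨ p = (cy + u0, cx) ∨ p = (cy + u0, cx + u0)) :
    sig cy cx w (u0 + 1) p = p := by
  simp only [sig]
  rcases hp with h | h | h <;> subst h <;> dsimp only <;> split_ifs <;>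
    first | rfl | (simp only [Prod.mk.injEq]; constructor <;> first | trivial | omega) | (exfalso; omega)

theorem sig_center (cy cx w lo : Int) : sig cy cx w lo (cy, cx) = (cy, cx) := by
  simp only [sig]
  split_ifs <;> first | rfl | (simp only [Prod.mk.injEq]; constructor <;> first | trivial | omega) | (exfalso; omega)

-- one iteration of A's inner loop turns the partial gather for lo = w-i+1 into the one for lo = w-i
theorem aInner_effect (cy cx w width : Int) (M N : List (List Int)) (hB : Bnd cy cx w width M)
    (hsh : sameShape N M) (i : Int) (hi0 : 0 ≤ i) (hiw : i < width)
    (hpt : ∀ r c : Int, InM M r c →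
      mget N r c = mget M (sig cy cx w (w - i + 1) (r, c)).1 (sig cy cx w (w - i + 1) (r, c)).2) :
    sameShape (aInner cy cx (cx - w) (cx + w) (cy + w) (mrow M cy) N i) M ∧
    ∀ r c : Int, InM M r c →
      mget (aInner cy cx (cx - w) (cx + w) (cy + w) (mrow M cy) N i) r c =
      mget M (sig cy cx w (w - i) (r, c)).1 (sig cy cx w (w - i) (r, c)).2 := by
  obtain ⟨b1, b2, b3, b4, b5, b6, b7⟩ := hB
  have hw0 : 0 ≤ w := by omega
  have h7 := b7 (w - i) (by omega) (by omega)
  have habs : cx + (w - i) < rowlen M (cy + (w - i)) ∧ cx - (w - i) < rowlen M (cy + (w - i)) := by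
    rcases abs_cases (w - i) with ⟨he, hs⟩ | ⟨he, hs⟩ <;> rw [he] at h7 <;>
      constructor <;> omega
  have hcM1 : InM M cy (cx - (w - i)) := ⟨by omega, by omega, by omega, by omega⟩
  have hcM2 : InM M (cy + (w - i)) (cx - (w - i)) := ⟨by omega, by omega, by omega, by omega⟩
  have hcM3 : InM M (cy + (w - i)) cx := ⟨by omega, by omega, by omega, by omega⟩
  have hcM4 : InM M (cy + (w - i)) (cx + (w - i)) := ⟨by omega, by omega, by omega, by omega⟩
  simp only [aInner]
  rw [show cx - w + i = cx - (w - i) from by ring, show cy + w - i = cy + (w - i) from by ring,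
      show cx + w - i = cx + (w - i) from by ring]
  have sh1 : sameShape (mset N cy (cx - (w - i)) (mget N (cy + (w - i)) (cx - (w - i)))) M :=
    sameShape_trans (mset_sameShape _ _ _ _ (by omega)) hsh
  set n1 := mset N cy (cx - (w - i)) (mget N (cy + (w - i)) (cx - (w - i))) with hn1
  have sh2 : sameShape (mset n1 (cy + (w - i)) (cx - (w - i)) (mget n1 (cy + (w - i)) cx)) M :=
    sameShape_trans (mset_sameShape _ _ _ _ (by omega)) sh1
  set n2 := mset n1 (cy + (w - i)) (cx - (w - i)) (mget n1 (cy + (w - i)) cx) with hn2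
  have sh3 : sameShape (mset n2 (cy + (w - i)) cx (mget n2 (cy + (w - i)) (cx + (w - i)))) M :=
    sameShape_trans (mset_sameShape _ _ _ _ (by omega)) sh2
  set n3 := mset n2 (cy + (w - i)) cx (mget n2 (cy + (w - i)) (cx + (w - i))) with hn3
  have sh4 : sameShape (mset n3 (cy + (w - i)) (cx + (w - i))
      (PySem.List.pyGetD (mrow M cy) (cx + (w - i)) 0)) M :=
    sameShape_trans (mset_sameShape _ _ _ _ (by omega)) sh3
  refine ⟨sh4, ?_⟩
  have hv1 : mget N (cy + (w - i)) (cx - (w - i)) = mget M (cy + (w - i)) (cx - (w - i)) := by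
    rw [hpt _ _ hcM2, sig_cell_fix cy cx w (w - i) _ (Or.inl rfl)]
  have hv2 : mget n1 (cy + (w - i)) cx = mget M (cy + (w - i)) cx := by
    by_cases h0 : w - i = 0
    · rw [hn1, h0]
      simp only [add_zero, sub_zero]
      obtain ⟨q1, q2, q3, q4⟩ := InM_of_sameShape hsh hcM3
      rw [h0] at q4
      simp only [add_zero, sub_zero] at q4
      rw [mget_mset_self _ _ _ _ (by omega) (by omega) (by omega) (by omega)]
      have := hpt cy cx (by simpa [h0] using hcM3)
      rw [sig_center] at this
      simpa using this
    · rw [hn1, mget_mset_ne _ _ _ _ _ _ (by omega) (by omega) (by omega) (by omega)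
        (by intro hcon; omega)]
      rw [hpt _ _ hcM3, sig_cell_fix cy cx w (w - i) _ (Or.inr (Or.inl rfl))]
  have hv3 : mget n2 (cy + (w - i)) (cx + (w - i)) = mget M (cy + (w - i)) (cx + (w - i)) := by
    by_cases h0 : w - i = 0
    · rw [hn2, h0]
      simp only [add_zero, sub_zero]
      obtain ⟨q1, q2, q3, q4⟩ := InM_of_sameShape sh1 hcM4
      rw [h0] at q4
      simp only [add_zero, sub_zero] at q4
      rw [mget_mset_self _ _ _ _ (by omega) (by omega) (by omega) (by omega)]
      have hx := hv2
      rw [h0] at hx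
      simpa using hx
    · rw [hn2, mget_mset_ne _ _ _ _ _ _ (by omega) (by omega) (by omega) (by omega)
        (by intro hcon; omega)]
      rw [hn1, mget_mset_ne _ _ _ _ _ _ (by omega) (by omega) (by omega) (by omega)
        (by intro hcon; omega)]
      rw [hpt _ _ hcM4, sig_cell_fix cy cx w (w - i) _ (Or.inr (Or.inr rfl))]
  intro r c hin
  obtain ⟨g1, g2, g3, g4⟩ := hin
  by_cases p4 : r = cy + (w - i) ∧ c = cx + (w - i)
  · obtain ⟨pr, pc⟩ := p4
    rw [pr, pc]
    obtain ⟨q1, q2, q3, q4⟩ := InM_of_sameShape sh3 hcM4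
    rw [mget_mset_self _ _ _ _ (by omega) (by omega) (by omega) (by omega)]
    rw [sig_cell4 cy cx w (w - i) (by omega)]
    rfl
  · rw [mget_mset_ne _ _ _ _ _ _ g1 g3 (by omega) (by omega) (by omega)]
    by_cases p3 : r = cy + (w - i) ∧ c = cx
    · obtain ⟨pr, pc⟩ := p3
      rw [pr, pc]
      have h0 : w - i ≠ 0 := by intro h; exact p4 ⟨by omega, by omega⟩
      obtain ⟨q1, q2, q3, q4⟩ := InM_of_sameShape sh2 hcM3
      rw [hn3, mget_mset_self _ _ _ _ (by omega) (by omega) (by omega) (by omega)]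
      rw [hv3, sig_cell3 cy cx w (w - i) (by omega)]
    · rw [hn3, mget_mset_ne _ _ _ _ _ _ g1 g3 (by omega) (by omega) (by omega)]
      by_cases p2 : r = cy + (w - i) ∧ c = cx - (w - i)
      · obtain ⟨pr, pc⟩ := p2
        rw [pr, pc]
        have h0 : w - i ≠ 0 := by intro h; exact p3 ⟨by omega, by omega⟩
        obtain ⟨q1, q2, q3, q4⟩ := InM_of_sameShape sh1 hcM2
        rw [hn2, mget_mset_self _ _ _ _ (by omega) (by omega) (by omega) (by omega)]
        rw [hv2, sig_cell2 cy cx w (w - i) (by omega)]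
      · rw [hn2, mget_mset_ne _ _ _ _ _ _ g1 g3 (by omega) (by omega) (by omega)]
        by_cases p1 : r = cy ∧ c = cx - (w - i)
        · obtain ⟨pr, pc⟩ := p1
          rw [pr, pc]
          have h0 : w - i ≠ 0 := by intro h; exact p2 ⟨by omega, by omega⟩
          obtain ⟨q1, q2, q3, q4⟩ := InM_of_sameShape hsh hcM1
          rw [hn1, mget_mset_self _ _ _ _ (by omega) (by omega) (by omega) (by omega)]
          rw [hv1, sig_cell1 cy cx w (w - i) (by omega)]
        · rw [hn1, mget_mset_ne _ _ _ _ _ _ g1 g3 (by omega) (by omega) (by omega)]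
          rw [hpt _ _ ⟨g1, g2, g3, g4⟩]
          rw [← sig_lo_step cy cx w (w - i) (r, c)
            (by intro h; exact p1 (by rw [Prod.mk.injEq] at h; exact h))
            (by intro h; exact p2 (by rw [Prod.mk.injEq] at h; exact h))
            (by intro h; exact p3 (by rw [Prod.mk.injEq] at h; exact h))
            (by intro h; exact p4 (by rw [Prod.mk.injEq] at h; exact h))]

-- the inner loop up to iteration k realises the partial gather with lo = w - k + 1
theorem aFold_char (cy cx w width : Int) (M : List (List Int)) (hB : Bnd cy cx w width M)
    (k : Nat) (hk : (k : Int) ≤ width) :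
    sameShape ((PySem.List.pyRange 0 (k : Int) 1).foldl
      (aInner cy cx (cx - w) (cx + w) (cy + w) (mrow M cy)) M) M ∧
    ∀ r c : Int, InM M r c →
      mget ((PySem.List.pyRange 0 (k : Int) 1).foldl
        (aInner cy cx (cx - w) (cx + w) (cy + w) (mrow M cy)) M) r c =
      mget M (sig cy cx w (w - (k : Int) + 1) (r, c)).1
        (sig cy cx w (w - (k : Int) + 1) (r, c)).2 := by
  induction k with
  | zero =>
    rw [show ((0 : Nat) : Int) = (0 : Int) from rfl,
      PySem.List.pyRange_one_eq_nil (le_refl (0 : Int))]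
    refine ⟨sameShape_refl M, ?_⟩
    intro r c hin
    rw [sig_id cy cx w (w - 0 + 1) (r, c) (by omega)]
    rfl
  | succ k ih =>
    have hk' : (k : Int) ≤ width := by push_cast at hk ⊢; omega
    obtain ⟨ihs, ihp⟩ := ih hk'
    have hcast : ((k + 1 : Nat) : Int) = (k : Int) + 1 := by push_cast; ring
    rw [hcast, PySem.List.pyRange_one_succ_right (by positivity), List.foldl_append]
    simp only [List.foldl_cons, List.foldl_nil]
    obtain ⟨es, ep⟩ := aInner_effect cy cx w width M _ hB ihs (k : Int) (by positivity)
      (by omega) ihp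
    rw [show w - ((k : Int) + 1) + 1 = w - (k : Int) from by ring]
    exact ⟨es, ep⟩

-- one full pass of A's outer loop is the complete one-step gather (lo = w - width + 1)
theorem aStep_char (cy cx w width : Int) (M : List (List Int)) (hB : Bnd cy cx w width M) :
    sameShape (aStep width cy cx (cx - w) (cx + w) (cy + w) M) M ∧
    ∀ r c : Int, InM M r c →
      mget (aStep width cy cx (cx - w) (cx + w) (cy + w) M) r c =
      mget M (sig cy cx w (w - width + 1) (r, c)).1 (sig cy cx w (w - width + 1) (r, c)).2 := by
  have h0 : (width.toNat : Int) = width := Int.toNat_of_nonneg (by exact_mod_cast hB.1.trans' (by omega))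
  have := aFold_char cy cx w width M hB width.toNat (by omega)
  rw [h0] at this
  simpa only [aStep] using this

-- t passes of the outer loop gather through the t-th iterate of sig
theorem aLoop_char (cy cx w width : Int) (M : List (List Int)) (hB : Bnd cy cx w width M)
    (s : Nat) :
    sameShape ((PySem.List.pyRange 0 (s : Int) 1).foldl
      (fun Mm _ => aStep width cy cx (cx - w) (cx + w) (cy + w) Mm) M) M ∧
    ∀ r c : Int, InM M r c →
      mget ((PySem.List.pyRange 0 (s : Int) 1).foldl
        (fun Mm _ => aStep width cy cx (cx - w) (cx + w) (cy + w) Mm) M) r c =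
      mget M ((sig cy cx w (w - width + 1))^[s] (r, c)).1
        ((sig cy cx w (w - width + 1))^[s] (r, c)).2 := by
  induction s with
  | zero =>
    rw [show ((0 : Nat) : Int) = (0 : Int) from rfl,
      PySem.List.pyRange_one_eq_nil (le_refl (0 : Int))]
    refine ⟨sameShape_refl M, ?_⟩
    intro r c hin
    simp [Function.iterate_zero]
  | succ s ih =>
    obtain ⟨ihs, ihp⟩ := ih
    have hcast : ((s + 1 : Nat) : Int) = (s : Int) + 1 := by push_cast; ring
    rw [hcast, PySem.List.pyRange_one_succ_right (by positivity), List.foldl_append]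
    simp only [List.foldl_cons, List.foldl_nil]
    have hB' := Bnd_of_sameShape ihs hB
    obtain ⟨ss, sp⟩ := aStep_char cy cx w width _ hB'
    refine ⟨sameShape_trans ss ihs, ?_⟩
    intro r c hin
    rw [sp r c (InM_of_sameShape ihs hin)]
    rcases sig_moved_inrange cy cx w width (w - width + 1) M hB (by omega) (r, c) with
      hfix | hin2
    · rw [hfix]
      rw [ihp r c hin]
      have : (sig cy cx w (w - width + 1))^[s + 1] (r, c) =
          (sig cy cx w (w - width + 1))^[s] (sig cy cx w (w - width + 1) (r, c)) :=
        Function.iterate_succ_apply _ _ _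
      rw [this, hfix]
    · have h2 := ihp (sig cy cx w (w - width + 1) (r, c)).1
        (sig cy cx w (w - width + 1) (r, c)).2 hin2
      simp only [Prod.mk.eta] at h2
      rw [h2]
      rw [Function.iterate_succ_apply]

-- ring cell of radius d at slot j (B's gather order)
def rcI (cy cx d : Int) (j : Int) : Int × Int :=
  if j = 0 then (cy - d, cx - d) else if j = 1 then (cy, cx - d)
  else if j = 2 then (cy + d, cx - d) else if j = 3 then (cy + d, cx)
  else if j = 4 then (cy + d, cx + d) else if j = 5 then (cy, cx + d)
  else if j = 6 then (cy - d, cx + d) else (cy - d, cx)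

-- the cells B writes while processing rings 1..n
def Wr (cy cx n : Int) (p : Int × Int) : Prop :=
  ∃ d j : Int, 1 ≤ d ∧ d ≤ n ∧ 0 ≤ j ∧ j < 8 ∧ p = rcI cy cx d j

-- Chebyshev radius, max-based so omega can use it
def radP (cy cx : Int) (p : Int × Int) : Int :=
  max (max (p.1 - cy) (cy - p.1)) (max (p.2 - cx) (cx - p.2))

theorem radP_rcI (cy cx d j : Int) (hd : 0 ≤ d) (hj0 : 0 ≤ j) (hj : j < 8) :
    radP cy cx (rcI cy cx d j) = d := by
  interval_cases j <;> simp only [rcI, radP] <;> norm_num <;> omega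

theorem Wr_rad (cy cx n : Int) (p : Int × Int) (h : Wr cy cx n p) :
    1 ≤ radP cy cx p ∧ radP cy cx p ≤ n := by
  obtain ⟨d, j, h1, h2, h3, h4, hp⟩ := h
  rw [hp, radP_rcI cy cx d j (by omega) h3 h4]
  omega

theorem Wr_mono (cy cx n n' : Int) (p : Int × Int) (hnn : n ≤ n') (h : Wr cy cx n p) :
    Wr cy cx n' p := by
  obtain ⟨d, j, h1, h2, h3, h4, hp⟩ := h
  exact ⟨d, j, h1, by omega, h3, h4, hp⟩

-- sig advances a ring cell by one slot
theorem sig_rc (cy cx w width d j : Int) (hd1 : 1 ≤ d) (hdw : d ≤ w)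
    (hodd : width = 2*w + 1) (hj0 : 0 ≤ j) (hj : j < 8) :
    sig cy cx w (w - width + 1) (rcI cy cx d j) = rcI cy cx d ((j + 1) % 8) := by
  interval_cases j <;> norm_num [rcI] <;> simp only [sig] <;> split_ifs <;>
    first | rfl | (simp only [Prod.mk.injEq]; constructor <;> first | trivial | omega) |
      (exfalso; omega)

theorem sig_rc_pow (cy cx w width d j : Int) (hd1 : 1 ≤ d) (hdw : d ≤ w)
    (hodd : width = 2*w + 1) (hj0 : 0 ≤ j) (hj : j < 8) (s : Nat) :
    (sig cy cx w (w - width + 1))^[s] (rcI cy cx d j) = rcI cy cx d ((j + s) % 8) := by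
  induction s generalizing j with
  | zero => simp; congr 1; omega
  | succ s ih =>
    rw [Function.iterate_succ_apply, sig_rc cy cx w width d j hd1 hdw hodd hj0 hj]
    rw [ih ((j + 1) % 8) (by omega) (by omega)]
    congr 1
    omega

-- a cell B never writes is fixed by sig
theorem sig_fix_unwr (cy cx w width : Int) (p : Int × Int) (hodd : width = 2*w + 1)
    (h : ¬ Wr cy cx w p) : sig cy cx w (w - width + 1) p = p := by
  simp only [sig]
  split_ifs with h1 h2 h3 h4
  · exfalso; apply h
    rcases Int.lt_or_lt_of_ne h1.1 with hu | hu
    · exact ⟨-(p.1 - cy), 6, by omega, by omega, by omega, by omega,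
        by norm_num [rcI]; exact Prod.ext (by omega) (by omega)⟩
    · exact ⟨p.1 - cy, 2, by omega, by omega, by omega, by omega,
        by norm_num [rcI]; exact Prod.ext (by omega) (by omega)⟩
  · exfalso; apply h
    rcases Int.lt_or_lt_of_ne h2.1 with hu | hu
    · exact ⟨-(p.1 - cy), 7, by omega, by omega, by omega, by omega,
        by norm_num [rcI]; exact Prod.ext (by omega) (by omega)⟩
    · exact ⟨p.1 - cy, 3, by omega, by omega, by omega, by omega,
        by norm_num [rcI]; exact Prod.ext (by omega) (by omega)⟩
  · exfalso; apply h
    rcases Int.lt_or_lt_of_ne h3.1 with hu | hu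
    · exact ⟨-(p.1 - cy), 0, by omega, by omega, by omega, by omega,
        by norm_num [rcI]; exact Prod.ext (by omega) (by omega)⟩
    · exact ⟨p.1 - cy, 4, by omega, by omega, by omega, by omega,
        by norm_num [rcI]; exact Prod.ext (by omega) (by omega)⟩
  · exfalso; apply h
    rcases Int.lt_or_lt_of_ne h4.2.1 with hv | hv
    · exact ⟨-(p.2 - cx), 1, by omega, by omega, by omega, by omega,
        by norm_num [rcI]; exact Prod.ext (by omega) (by omega)⟩
    · exact ⟨p.2 - cx, 5, by omega, by omega, by omega, by omega,
        by norm_num [rcI]; exact Prod.ext (by omega) (by omega)⟩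
  · rfl

theorem rc_InM (cy cx w width d j : Int) (M : List (List Int)) (hB : Bnd cy cx w width M)
    (hd1 : 1 ≤ d) (hdw : d ≤ w) (hj0 : 0 ≤ j) (hj : j < 8) :
    InM M (rcI cy cx d j).1 (rcI cy cx d j).2 := by
  obtain ⟨b1, b2, b3, b4, b5, b6, b7⟩ := hB
  have h7p := b7 d (by omega) (by omega)
  rw [abs_of_nonneg (by omega)] at h7p
  have h7m := b7 (-d) (by omega) (by omega)
  rw [abs_neg, abs_of_nonneg (by omega), show cy + -d = cy - d from by ring] at h7m
  interval_cases j <;> norm_num [rcI, InM] <;>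
    exact ⟨by omega, by omega, by omega, by omega⟩

theorem getv8 (f : Int × Int → Int) (cy cx d jj : Int) (h0 : 0 ≤ jj) (h8 : jj < 8) :
    PySem.List.pyGetD ((bCells cy cx d).map f) jj 0 = f (rcI cy cx d jj) := by
  interval_cases jj <;> rfl

theorem Wr_intro (cy cx d j : Int) (hd1 : 1 ≤ d) (hj0 : 0 ≤ j) (hj : j < 8) :
    Wr cy cx d (rcI cy cx d j) :=
  ⟨d, j, hd1, le_refl d, hj0, hj, rfl⟩

theorem Wr_down (cy cx d : Int) (p : Int × Int)
    (hne : ∀ j : Int, 0 ≤ j → j < 8 → p ≠ rcI cy cx d j)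
    (h : Wr cy cx d p) : Wr cy cx (d - 1) p := by
  obtain ⟨d', j, h1, h2, h3, h4, hp⟩ := h
  by_cases hdd : d' = d
  · subst hdd
    exact absurd hp (hne j h3 h4)
  · exact ⟨d', j, h1, by omega, h3, h4, hp⟩

-- processing ring d rotates exactly its own cells by t1 and leaves everything else alone
set_option maxHeartbeats 6000000 in
theorem bBody_char (cy cx w width t1 : Int) (M N : List (List Int)) (hB : Bnd cy cx w width M)
    (ht1 : 0 ≤ t1) (d : Int) (hd1 : 1 ≤ d) (hdw : d ≤ w) (hsh : sameShape N M)
    (hptW : ∀ r c : Int, InM M r c → Wr cy cx (d - 1) (r, c) →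
      mget N r c = mget M ((sig cy cx w (w - width + 1))^[t1.toNat] (r, c)).1
        ((sig cy cx w (w - width + 1))^[t1.toNat] (r, c)).2)
    (hptE : ∀ r c : Int, InM M r c → ¬ Wr cy cx (d - 1) (r, c) →
      mget N r c = mget M r c) :
    sameShape (bBody cy cx t1 N d) M ∧
    ∀ r c : Int, InM M r c →
      (Wr cy cx d (r, c) →
        mget (bBody cy cx t1 N d) r c =
          mget M ((sig cy cx w (w - width + 1))^[t1.toNat] (r, c)).1
            ((sig cy cx w (w - width + 1))^[t1.toNat] (r, c)).2) ∧
      (¬ Wr cy cx d (r, c) →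
        mget (bBody cy cx t1 N d) r c = mget M r c) := by
  obtain ⟨b1, b2, b3, b4, b5, b6, b7⟩ := hB
  have hB' : Bnd cy cx w width M := ⟨b1, b2, b3, b4, b5, b6, b7⟩
  have hmodn : ∀ i : Int, 0 ≤ PySem.Int.mod (i + t1) 8 := fun i => PySem.Int.mod_nonneg _ (by omega)
  have hmodl : ∀ i : Int, PySem.Int.mod (i + t1) 8 < 8 := fun i => PySem.Int.mod_lt _ (by omega)
  have hmodc : ∀ i : Int, PySem.Int.mod (i + t1) 8 = (i + (t1.toNat : Int)) % 8 := by
    intro i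
    rw [PySem.Int.mod_eq_emod_of_pos (by omega)]
    omega
  have hrc : ∀ j : Int, 0 ≤ j → j < 8 → InM M (rcI cy cx d j).1 (rcI cy cx d j).2 :=
    fun j h1 h2 => rc_InM cy cx w width d j M hB' hd1 hdw h1 h2
  have hnW : ∀ j : Int, 0 ≤ j → j < 8 → ¬ Wr cy cx (d - 1) (rcI cy cx d j) := by
    intro j h1 h2 hWr
    have hr := Wr_rad cy cx (d - 1) _ hWr
    rw [radP_rcI cy cx d j (by omega) h1 h2] at hr
    omega
  have hval : ∀ j : Int, 0 ≤ j → j < 8 →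
      mget N (rcI cy cx d j).1 (rcI cy cx d j).2 =
      mget M (rcI cy cx d j).1 (rcI cy cx d j).2 := by
    intro j h1 h2
    exact hptE _ _ (hrc j h1 h2) (hnW j h1 h2)
  simp only [bBody]
  rw [show PySem.List.pyRange 0 8 1 = [0, 1, 2, 3, 4, 5, 6, 7] from rfl]
  simp only [List.foldl_cons, List.foldl_nil]
  rw [getv8 _ cy cx d _ (hmodn 0) (hmodl 0), getv8 _ cy cx d _ (hmodn 1) (hmodl 1),
      getv8 _ cy cx d _ (hmodn 2) (hmodl 2), getv8 _ cy cx d _ (hmodn 3) (hmodl 3),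
      getv8 _ cy cx d _ (hmodn 4) (hmodl 4), getv8 _ cy cx d _ (hmodn 5) (hmodl 5),
      getv8 _ cy cx d _ (hmodn 6) (hmodl 6), getv8 _ cy cx d _ (hmodn 7) (hmodl 7)]
  rw [show PySem.List.pyGetD (bCells cy cx d) (0 : Int) ((0 : Int), (0 : Int)) =
        (cy - d, cx - d) from rfl,
      show PySem.List.pyGetD (bCells cy cx d) (1 : Int) ((0 : Int), (0 : Int)) =
        (cy, cx - d) from rfl,
      show PySem.List.pyGetD (bCells cy cx d) (2 : Int) ((0 : Int), (0 : Int)) =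
        (cy + d, cx - d) from rfl,
      show PySem.List.pyGetD (bCells cy cx d) (3 : Int) ((0 : Int), (0 : Int)) =
        (cy + d, cx) from rfl,
      show PySem.List.pyGetD (bCells cy cx d) (4 : Int) ((0 : Int), (0 : Int)) =
        (cy + d, cx + d) from rfl,
      show PySem.List.pyGetD (bCells cy cx d) (5 : Int) ((0 : Int), (0 : Int)) =
        (cy, cx + d) from rfl,
      show PySem.List.pyGetD (bCells cy cx d) (6 : Int) ((0 : Int), (0 : Int)) =
        (cy - d, cx + d) from rfl,
      show PySem.List.pyGetD (bCells cy cx d) (7 : Int) ((0 : Int), (0 : Int)) =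
        (cy - d, cx) from rfl]
  dsimp only
  set m1 := mset N (cy - d) (cx - d) (mget N (rcI cy cx d (PySem.Int.mod (0 + t1) 8)).1 (rcI cy cx d (PySem.Int.mod (0 + t1) 8)).2) with hm1
  set m2 := mset m1 cy (cx - d) (mget N (rcI cy cx d (PySem.Int.mod (1 + t1) 8)).1 (rcI cy cx d (PySem.Int.mod (1 + t1) 8)).2) with hm2
  set m3 := mset m2 (cy + d) (cx - d) (mget N (rcI cy cx d (PySem.Int.mod (2 + t1) 8)).1 (rcI cy cx d (PySem.Int.mod (2 + t1) 8)).2) with hm3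
  set m4 := mset m3 (cy + d) cx (mget N (rcI cy cx d (PySem.Int.mod (3 + t1) 8)).1 (rcI cy cx d (PySem.Int.mod (3 + t1) 8)).2) with hm4
  set m5 := mset m4 (cy + d) (cx + d) (mget N (rcI cy cx d (PySem.Int.mod (4 + t1) 8)).1 (rcI cy cx d (PySem.Int.mod (4 + t1) 8)).2) with hm5
  set m6 := mset m5 cy (cx + d) (mget N (rcI cy cx d (PySem.Int.mod (5 + t1) 8)).1 (rcI cy cx d (PySem.Int.mod (5 + t1) 8)).2) with hm6
  set m7 := mset m6 (cy - d) (cx + d) (mget N (rcI cy cx d (PySem.Int.mod (6 + t1) 8)).1 (rcI cy cx d (PySem.Int.mod (6 + t1) 8)).2) with hm7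
  have sh0 : sameShape N M := hsh
  have sh1 : sameShape m1 M := sameShape_trans (mset_sameShape _ _ _ _ (by omega)) sh0
  have sh2 : sameShape m2 M := sameShape_trans (mset_sameShape _ _ _ _ (by omega)) sh1
  have sh3 : sameShape m3 M := sameShape_trans (mset_sameShape _ _ _ _ (by omega)) sh2
  have sh4 : sameShape m4 M := sameShape_trans (mset_sameShape _ _ _ _ (by omega)) sh3
  have sh5 : sameShape m5 M := sameShape_trans (mset_sameShape _ _ _ _ (by omega)) sh4
  have sh6 : sameShape m6 M := sameShape_trans (mset_sameShape _ _ _ _ (by omega)) sh5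
  have sh7 : sameShape m7 M := sameShape_trans (mset_sameShape _ _ _ _ (by omega)) sh6
  have sh8 : sameShape (mset m7 (cy - d) cx (mget N (rcI cy cx d (PySem.Int.mod (7 + t1) 8)).1 (rcI cy cx d (PySem.Int.mod (7 + t1) 8)).2)) M := sameShape_trans (mset_sameShape _ _ _ _ (by omega)) sh7
  refine ⟨sh8, ?_⟩
  intro r c hin
  obtain ⟨g1, g2, g3, g4⟩ := hin
  have hc0 : InM M (cy - d) (cx - d) := by
    have h := hrc 0 (by omega) (by omega)
    norm_num [rcI] at h
    exact h
  have hc1 : InM M cy (cx - d) := by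
    have h := hrc 1 (by omega) (by omega)
    norm_num [rcI] at h
    exact h
  have hc2 : InM M (cy + d) (cx - d) := by
    have h := hrc 2 (by omega) (by omega)
    norm_num [rcI] at h
    exact h
  have hc3 : InM M (cy + d) cx := by
    have h := hrc 3 (by omega) (by omega)
    norm_num [rcI] at h
    exact h
  have hc4 : InM M (cy + d) (cx + d) := by
    have h := hrc 4 (by omega) (by omega)
    norm_num [rcI] at h
    exact h
  have hc5 : InM M cy (cx + d) := by
    have h := hrc 5 (by omega) (by omega)
    norm_num [rcI] at h
    exact h
  have hc6 : InM M (cy - d) (cx + d) := by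
    have h := hrc 6 (by omega) (by omega)
    norm_num [rcI] at h
    exact h
  have hc7 : InM M (cy - d) cx := by
    have h := hrc 7 (by omega) (by omega)
    norm_num [rcI] at h
    exact h
  by_cases p7 : r = (cy - d) ∧ c = cx
  · rw [p7.1, p7.2]
    obtain ⟨q1, q2, q3, q4⟩ := InM_of_sameShape sh7 hc7
    rw [mget_mset_self _ _ _ _ (by omega) (by omega) (by omega) (by omega)]
    rw [hval _ (hmodn 7) (hmodl 7)]
    constructor
    · intro _
      rw [show (((cy - d), cx) : Int × Int) = rcI cy cx d 7 from rfl,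
        sig_rc_pow cy cx w width d 7 hd1 hdw b2 (by omega) (by omega), hmodc 7]
    · intro hnWr
      exact absurd (Wr_intro cy cx d 7 hd1 (by omega) (by omega)) hnWr
  · rw [mget_mset_ne _ _ _ _ _ _ g1 g3 (by omega) (by omega) (by intro hcon; exact p7 ⟨by omega, by omega⟩)]
    rw [hm7]
    by_cases p6 : r = (cy - d) ∧ c = (cx + d)
    · rw [p6.1, p6.2]
      obtain ⟨q1, q2, q3, q4⟩ := InM_of_sameShape sh6 hc6
      rw [mget_mset_self _ _ _ _ (by omega) (by omega) (by omega) (by omega)]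
      rw [hval _ (hmodn 6) (hmodl 6)]
      constructor
      · intro _
        rw [show (((cy - d), (cx + d)) : Int × Int) = rcI cy cx d 6 from rfl,
          sig_rc_pow cy cx w width d 6 hd1 hdw b2 (by omega) (by omega), hmodc 6]
      · intro hnWr
        exact absurd (Wr_intro cy cx d 6 hd1 (by omega) (by omega)) hnWr
    · rw [mget_mset_ne _ _ _ _ _ _ g1 g3 (by omega) (by omega) (by intro hcon; exact p6 ⟨by omega, by omega⟩)]
      rw [hm6]
      by_cases p5 : r = cy ∧ c = (cx + d)
      · rw [p5.1, p5.2]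
        obtain ⟨q1, q2, q3, q4⟩ := InM_of_sameShape sh5 hc5
        rw [mget_mset_self _ _ _ _ (by omega) (by omega) (by omega) (by omega)]
        rw [hval _ (hmodn 5) (hmodl 5)]
        constructor
        · intro _
          rw [show ((cy, (cx + d)) : Int × Int) = rcI cy cx d 5 from rfl,
            sig_rc_pow cy cx w width d 5 hd1 hdw b2 (by omega) (by omega), hmodc 5]
        · intro hnWr
          exact absurd (Wr_intro cy cx d 5 hd1 (by omega) (by omega)) hnWr
      · rw [mget_mset_ne _ _ _ _ _ _ g1 g3 (by omega) (by omega) (by intro hcon; exact p5 ⟨by omega, by omega⟩)]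
        rw [hm5]
        by_cases p4 : r = (cy + d) ∧ c = (cx + d)
        · rw [p4.1, p4.2]
          obtain ⟨q1, q2, q3, q4⟩ := InM_of_sameShape sh4 hc4
          rw [mget_mset_self _ _ _ _ (by omega) (by omega) (by omega) (by omega)]
          rw [hval _ (hmodn 4) (hmodl 4)]
          constructor
          · intro _
            rw [show (((cy + d), (cx + d)) : Int × Int) = rcI cy cx d 4 from rfl,
              sig_rc_pow cy cx w width d 4 hd1 hdw b2 (by omega) (by omega), hmodc 4]
          · intro hnWr
            exact absurd (Wr_intro cy cx d 4 hd1 (by omega) (by omega)) hnWr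
        · rw [mget_mset_ne _ _ _ _ _ _ g1 g3 (by omega) (by omega) (by intro hcon; exact p4 ⟨by omega, by omega⟩)]
          rw [hm4]
          by_cases p3 : r = (cy + d) ∧ c = cx
          · rw [p3.1, p3.2]
            obtain ⟨q1, q2, q3, q4⟩ := InM_of_sameShape sh3 hc3
            rw [mget_mset_self _ _ _ _ (by omega) (by omega) (by omega) (by omega)]
            rw [hval _ (hmodn 3) (hmodl 3)]
            constructor
            · intro _
              rw [show (((cy + d), cx) : Int × Int) = rcI cy cx d 3 from rfl,
                sig_rc_pow cy cx w width d 3 hd1 hdw b2 (by omega) (by omega), hmodc 3]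
            · intro hnWr
              exact absurd (Wr_intro cy cx d 3 hd1 (by omega) (by omega)) hnWr
          · rw [mget_mset_ne _ _ _ _ _ _ g1 g3 (by omega) (by omega) (by intro hcon; exact p3 ⟨by omega, by omega⟩)]
            rw [hm3]
            by_cases p2 : r = (cy + d) ∧ c = (cx - d)
            · rw [p2.1, p2.2]
              obtain ⟨q1, q2, q3, q4⟩ := InM_of_sameShape sh2 hc2
              rw [mget_mset_self _ _ _ _ (by omega) (by omega) (by omega) (by omega)]
              rw [hval _ (hmodn 2) (hmodl 2)]
              constructor
              · intro _
                rw [show (((cy + d), (cx - d)) : Int × Int) = rcI cy cx d 2 from rfl,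
                  sig_rc_pow cy cx w width d 2 hd1 hdw b2 (by omega) (by omega), hmodc 2]
              · intro hnWr
                exact absurd (Wr_intro cy cx d 2 hd1 (by omega) (by omega)) hnWr
            · rw [mget_mset_ne _ _ _ _ _ _ g1 g3 (by omega) (by omega) (by intro hcon; exact p2 ⟨by omega, by omega⟩)]
              rw [hm2]
              by_cases p1 : r = cy ∧ c = (cx - d)
              · rw [p1.1, p1.2]
                obtain ⟨q1, q2, q3, q4⟩ := InM_of_sameShape sh1 hc1
                rw [mget_mset_self _ _ _ _ (by omega) (by omega) (by omega) (by omega)]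
                rw [hval _ (hmodn 1) (hmodl 1)]
                constructor
                · intro _
                  rw [show ((cy, (cx - d)) : Int × Int) = rcI cy cx d 1 from rfl,
                    sig_rc_pow cy cx w width d 1 hd1 hdw b2 (by omega) (by omega), hmodc 1]
                · intro hnWr
                  exact absurd (Wr_intro cy cx d 1 hd1 (by omega) (by omega)) hnWr
              · rw [mget_mset_ne _ _ _ _ _ _ g1 g3 (by omega) (by omega) (by intro hcon; exact p1 ⟨by omega, by omega⟩)]
                rw [hm1]
                by_cases p0 : r = (cy - d) ∧ c = (cx - d)
                · rw [p0.1, p0.2]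
                  obtain ⟨q1, q2, q3, q4⟩ := InM_of_sameShape sh0 hc0
                  rw [mget_mset_self _ _ _ _ (by omega) (by omega) (by omega) (by omega)]
                  rw [hval _ (hmodn 0) (hmodl 0)]
                  constructor
                  · intro _
                    rw [show (((cy - d), (cx - d)) : Int × Int) = rcI cy cx d 0 from rfl,
                      sig_rc_pow cy cx w width d 0 hd1 hdw b2 (by omega) (by omega), hmodc 0]
                  · intro hnWr
                    exact absurd (Wr_intro cy cx d 0 hd1 (by omega) (by omega)) hnWr
                · rw [mget_mset_ne _ _ _ _ _ _ g1 g3 (by omega) (by omega) (by intro hcon; exact p0 ⟨by omega, by omega⟩)]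
                  have hneJ : ∀ j : Int, 0 ≤ j → j < 8 → ((r, c) : Int × Int) ≠ rcI cy cx d j := by
                    intro j hj0 hj8 hcon
                    have h1 : r = (rcI cy cx d j).1 := congrArg Prod.fst hcon
                    have h2 : c = (rcI cy cx d j).2 := congrArg Prod.snd hcon
                    interval_cases j <;> norm_num [rcI] at h1 h2 <;>
                      first | exact p0 ⟨h1, h2⟩ | exact p1 ⟨h1, h2⟩ | exact p2 ⟨h1, h2⟩ | exact p3 ⟨h1, h2⟩ | exact p4 ⟨h1, h2⟩ | exact p5 ⟨h1, h2⟩ | exact p6 ⟨h1, h2⟩ | exact p7 ⟨h1, h2⟩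
                  constructor
                  · intro hWr
                    exact hptW r c ⟨g1, g2, g3, g4⟩ (Wr_down cy cx d (r, c) hneJ hWr)
                  · intro hnWr
                    exact hptE r c ⟨g1, g2, g3, g4⟩
                      (fun hh => hnWr (Wr_mono cy cx (d - 1) d (r, c) (by omega) hh))

-- processing rings 1..n rotates exactly the cells written so far
theorem bLoop_char (cy cx w width t1 : Int) (M : List (List Int)) (hB : Bnd cy cx w width M)
    (ht1 : 0 ≤ t1) (n : Nat) (hn : (n : Int) ≤ w) :
    sameShape ((PySem.List.pyRange 1 ((n : Int) + 1) 1).foldl (bBody cy cx t1) M) M ∧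
    ∀ r c : Int, InM M r c →
      (Wr cy cx (n : Int) (r, c) →
        mget ((PySem.List.pyRange 1 ((n : Int) + 1) 1).foldl (bBody cy cx t1) M) r c =
          mget M ((sig cy cx w (w - width + 1))^[t1.toNat] (r, c)).1
            ((sig cy cx w (w - width + 1))^[t1.toNat] (r, c)).2) ∧
      (¬ Wr cy cx (n : Int) (r, c) →
        mget ((PySem.List.pyRange 1 ((n : Int) + 1) 1).foldl (bBody cy cx t1) M) r c =
          mget M r c) := by
  induction n with
  | zero =>
    rw [show ((0 : Nat) : Int) + 1 = (1 : Int) from rfl,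
      PySem.List.pyRange_one_eq_nil (le_refl (1 : Int))]
    refine ⟨sameShape_refl M, ?_⟩
    intro r c hin
    constructor
    · intro hWr
      obtain ⟨d, j, h1, h2, _⟩ := hWr
      exfalso
      omega
    · intro _
      rfl
  | succ n ih =>
    have hn' : (n : Int) ≤ w := by push_cast at hn ⊢; omega
    obtain ⟨ihs, ihp⟩ := ih hn'
    have hcast : ((n + 1 : Nat) : Int) = (n : Int) + 1 := by push_cast; ring
    rw [hcast, PySem.List.pyRange_one_succ_right (by omega), List.foldl_append]
    simp only [List.foldl_cons, List.foldl_nil]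
    have heq : (n : Int) + 1 - 1 = (n : Int) := by ring
    obtain ⟨es, ep⟩ := bBody_char cy cx w width t1 M _ hB ht1 ((n : Int) + 1) (by omega)
      (by push_cast at hn; omega) ihs
      (fun r c hin hW => (ihp r c hin).1 (by rwa [heq] at hW))
      (fun r c hin hW => (ihp r c hin).2 (by rwa [heq] at hW))
    exact ⟨es, ep⟩

-- with w = 0 (width = 1) nothing moves
theorem sig_id0 (cy cx : Int) (p : Int × Int) : sig cy cx 0 0 p = p := by
  simp only [sig]
  split_ifs <;> first | rfl | (exfalso; omega)

-- a loop whose body does nothing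
theorem foldl_self {β : Type} (l : List β) (f : List (List Int) → β → List (List Int))
    (hf : ∀ a x, f a x = a) (a : List (List Int)) : l.foldl f a = a := by
  induction l generalizing a with
  | nil => rfl
  | cons x xs ih => rw [List.foldl_cons, hf a x, ih a]

-- ===== VERDICT (by name: the statement is the Claim_ definition above) =====
theorem starRotation_spec : Claim_equal_starRotation := by
  unfold Claim_equal_starRotation Spec_starRotation
  intro matrix width center t _ hpre
  obtain ⟨hc2, hcases⟩ := hpre
  simp only [starRotation, starRotation_alt]
  set w := PySem.Int.floordiv width 2 with hw
  set t1 := PySem.Int.mod t 8 with ht1def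
  set cy := PySem.List.pyGetD center 0 0 with hcy
  set cx := PySem.List.pyGetD center 1 0 with hcx
  have ht1n : 0 ≤ t1 := by rw [ht1def]; exact PySem.Int.mod_nonneg _ (by omega)
  by_cases ht10 : t1 = 0
  · rw [ht10, PySem.List.pyRange_one_eq_nil (le_refl (0 : Int)), if_pos rfl]
    rfl
  rcases hcases with ht0 | ⟨hwneg, _⟩ | ⟨hwid1, hoddm, p1, p2, p3, p4, p7⟩
  · exact absurd ht0 ht10
  · -- width ≤ 0 : both loops do nothing
    have hstep : ∀ Mm, aStep width cy cx (cx - w) (cx + w) (cy + w) Mm = Mm := by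
      intro Mm
      simp only [aStep]
      rw [PySem.List.pyRange_one_eq_nil (by omega : width ≤ (0 : Int))]
      rfl
    rw [foldl_self _ _ (fun a _ => hstep a) matrix]
    have hwle : w ≤ 0 := by
      have h := (PySem.Int.floordiv_lt_iff_lt_mul (by omega : (0:Int) < 2)).2
        (by omega : width < 1 * 2)
      rw [← hw] at h
      omega
    rw [if_neg ht10]
    rw [PySem.List.pyRange_one_eq_nil (by omega : w + 1 ≤ (1 : Int))]
    rfl
  · -- the real case: the odd-width star fits in the matrix
    have hrange := (PySem.Int.floordiv_eq_iff_of_pos (by omega : (0:Int) < 2)).1 hw.symm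
    have hm2 : width % 2 = 1 := by
      rw [PySem.Int.mod_eq_emod_of_pos (by omega)] at hoddm
      exact hoddm
    have hpar : width = 2*w + 1 := by omega
    have hBnd : Bnd cy cx w width matrix := by
      refine ⟨hwid1, hpar, p1, p3, p4, p2, ?_⟩
      intro u hu1 hu2
      have hi := p7 (w - u) (by rw [PySem.List.mem_pyRange_one]; constructor <;> omega)
      rw [show w - (w - u) = u from by ring, show cy + w - (w - u) = cy + u from by ring] at hi
      exact hi
    have htb : ((t1.toNat : Nat) : Int) = t1 := Int.toNat_of_nonneg ht1n
    conv_lhs => rw [show t1 = ((t1.toNat : Nat) : Int) from htb.symm]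
    obtain ⟨las, lap⟩ := aLoop_char cy cx w width matrix hBnd t1.toNat
    by_cases hw0 : w = 0
    · -- width = 1 : the star is the centre cell only, nothing moves
      have hrangenil : PySem.List.pyRange 1 (w + 1) 1 = [] := by
        rw [hw0]; exact PySem.List.pyRange_one_eq_nil (by omega)
      rw [if_neg ht10, hrangenil]
      simp only [List.foldl_nil]
      have hW1 : width = 1 := by omega
      have hsid : ∀ p : Int × Int, sig cy cx w (w - width + 1) p = p := by
        intro p
        rw [hw0, hW1]
        exact sig_id0 cy cx p
      refine mext _ _ las.1 las.2 ?_
      intro r c hin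
      have hinM : InM matrix r c := InM_of_sameShape (sameShape_symm las) hin
      rw [lap r c hinM, Function.iterate_fixed (hsid (r, c)) t1.toNat]
    · have hw1 : 1 ≤ w := by omega
      rw [if_neg ht10]
      have hwb : ((w.toNat : Nat) : Int) = w := Int.toNat_of_nonneg (by omega)
      conv_rhs => rw [show w + 1 = ((w.toNat : Nat) : Int) + 1 from by rw [hwb]]
      obtain ⟨lbs, lbp⟩ := bLoop_char cy cx w width t1 matrix hBnd ht1n w.toNat (by omega)
      refine mext _ _ (las.1.trans lbs.1.symm)
        (fun r hr => (las.2 r hr).trans (lbs.2 r hr).symm) ?_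
      intro r c hin
      have hinM : InM matrix r c := InM_of_sameShape (sameShape_symm las) hin
      rw [lap r c hinM]
      obtain ⟨bp1, bp2⟩ := lbp r c hinM
      by_cases hWr : Wr cy cx ((w.toNat : Nat) : Int) (r, c)
      · rw [bp1 hWr]
      · rw [bp2 hWr]
        have hfix := sig_fix_unwr cy cx w width (r, c) hpar (by rwa [hwb] at hWr)
        rw [Function.iterate_fixed hfix t1.toNat]
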